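-- pv_equiv track=rewrite | github.com/leechehao/chehaonlp | umls_ner/utils.py | collect_colon_item
-- ===== SOURCE A (Python) =====
-- def collect_colon_item(words, label_seq, collect_loc_combine, collect_sym_combine):
--     collect_colon_loc_sym = []
--     if ':' in words:
--         colon_idx = words.index(':')
--         colon_item = all(label != 'Other' or words[i] == 'and' for i, label in enumerate(label_seq[:colon_idx]))
--         if colon_item:
--             for item in sorted(collect_loc_combine + collect_sym_combine, key=lambda x:x[0]):
--                 if item[1] <= colon_idx:
--                     collect_colon_loc_sym.append(item)
--             collect_loc_combine = [item for item in collect_loc_combine if item not in collect_colon_loc_sym]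
--             collect_sym_combine = [item for item in collect_sym_combine if item not in collect_colon_loc_sym]
--     return collect_colon_loc_sym, collect_loc_combine, collect_sym_combine
-- ===== SOURCE B (Python) =====
-- def collect_colon_item(words, label_seq, collect_loc_combine, collect_sym_combine):
--     # Single fused scan: find the first colon while validating the prefix labels;
--     # bail out as soon as a non-'and' word labelled 'Other' appears before it.
--     colon_idx = None
--     for i, word in enumerate(words):
--         if word == ':':
--             colon_idx = i
--             break
--         if i < len(label_seq) and label_seq[i] == 'Other' and word != 'and':
--             return [], collect_loc_combine, collect_sym_combine
--     if colon_idx is None: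
--         return [], collect_loc_combine, collect_sym_combine
--     # One partitioning pass per list, then sort only the collected items.
--     collected, loc, sym = [], [], []
--     for item in collect_loc_combine:
--         (collected if item[1] <= colon_idx else loc).append(item)
--     for item in collect_sym_combine:
--         (collected if item[1] <= colon_idx else sym).append(item)
--     collected.sort(key=lambda x: x[0])
--     return collected, loc, sym
-- ===== Notes on version B (the rewrite author's own statement) =====
-- stated objective: alternative
-- what changed: B fuses the colon search and prefix validation into one early-exiting scan over the words (instead of index() plus a separate all(enumerate(...)) pass), partitions each input list in a single pass into collected/kept accumulators (instead of sorting the concatenation, filtering it, and re-scanning the inputs with quadratic 'not in' membership tests), and sorts only the collected items at the end; it trades the sort-then-filter order for partition-then-sort, correct because Python's sort is stable.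
import Mathlib
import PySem

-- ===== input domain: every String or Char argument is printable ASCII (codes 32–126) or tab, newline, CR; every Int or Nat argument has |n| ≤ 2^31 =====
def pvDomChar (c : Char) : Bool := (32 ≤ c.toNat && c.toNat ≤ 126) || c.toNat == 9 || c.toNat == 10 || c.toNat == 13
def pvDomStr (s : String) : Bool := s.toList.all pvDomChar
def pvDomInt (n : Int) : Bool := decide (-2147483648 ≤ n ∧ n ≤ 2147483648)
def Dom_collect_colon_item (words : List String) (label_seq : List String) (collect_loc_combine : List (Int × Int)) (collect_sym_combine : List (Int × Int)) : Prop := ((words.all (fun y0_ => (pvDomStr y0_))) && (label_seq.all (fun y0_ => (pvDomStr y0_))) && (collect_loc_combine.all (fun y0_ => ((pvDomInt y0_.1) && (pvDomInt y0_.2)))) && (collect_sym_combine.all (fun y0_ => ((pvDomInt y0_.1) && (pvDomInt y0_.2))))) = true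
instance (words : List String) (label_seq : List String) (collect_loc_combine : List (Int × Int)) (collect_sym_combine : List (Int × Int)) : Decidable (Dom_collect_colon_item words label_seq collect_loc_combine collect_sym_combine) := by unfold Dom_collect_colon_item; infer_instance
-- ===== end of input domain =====

-- B (alternative, same cost): one fused early-exit scan replaces index()+all(), per-list partition
-- passes replace the sort-filter-and-membership-rescan; only the collected items are sorted (stable).
-- ===== PORT A =====
def collect_colon_item (words : List String) (label_seq : List String) (collect_loc_combine : List (Int × Int)) (collect_sym_combine : List (Int × Int)) : (List (Int × Int)) × (List (Int × Int)) × (List (Int × Int)) :=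
  let collect_colon_loc_sym : List (Int × Int) := []
  if words.contains ":" then
    match PySem.List.index? words ":" with
    | none => (collect_colon_loc_sym, collect_loc_combine, collect_sym_combine)  -- unreachable: ':' ∈ words
    | some colon_idx =>
      let colon_item := (PySem.List.enumerate (PySem.List.slice label_seq none (some (colon_idx : Int)))).all
        (fun p => decide (p.2 ≠ "Other") || (PySem.List.pyGet? words p.1 == some "and"))
      if colon_item then
        let collect_colon_loc_sym :=
          (PySem.List.sorted (collect_loc_combine ++ collect_sym_combine) (fun x => x.1) false).foldl
            (fun acc item => if item.2 ≤ (colon_idx : Int) then acc ++ [item] else acc) collect_colon_loc_sym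
        let loc' := collect_loc_combine.filter (fun item => !(collect_colon_loc_sym.contains item))
        let sym' := collect_sym_combine.filter (fun item => !(collect_colon_loc_sym.contains item))
        (collect_colon_loc_sym, loc', sym')
      else (collect_colon_loc_sym, collect_loc_combine, collect_sym_combine)
  else (collect_colon_loc_sym, collect_loc_combine, collect_sym_combine)

-- ===== PORT B =====
-- B: one fused early-exiting scan finds the colon while validating the prefix labels;
-- each list is partitioned in a single pass; only the collected items are sorted at the end.
-- (B's 'for i, word in enumerate(words)' loop with the 'i < len(label_seq)' guard: the labels
-- list is consumed in lockstep with the words, so its head IS label_seq[i].)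
def pvScan : List String → List String → Nat → Option Nat
  | [], _, _ => none
  | w :: ws, ls, i =>
    if w == ":" then some i
    else
      match ls with
      | [] => pvScan ws [] (i + 1)
      | l :: ls' => if l == "Other" && w != "and" then none else pvScan ws ls' (i + 1)

-- B's '(collected if item[1] <= colon_idx else kept).append(item)' partition loop.
def pvPartStep (c : Int) (acc : List (Int × Int) × List (Int × Int)) (item : Int × Int) : List (Int × Int) × List (Int × Int) :=
  if item.2 ≤ c then (acc.1 ++ [item], acc.2) else (acc.1, acc.2 ++ [item])

def collect_colon_item_alt (words : List String) (label_seq : List String) (collect_loc_combine : List (Int × Int)) (collect_sym_combine : List (Int × Int)) : (List (Int × Int)) × (List (Int × Int)) × (List (Int × Int)) :=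
  match pvScan words label_seq 0 with
  | none => ([], collect_loc_combine, collect_sym_combine)
  | some colon_idx =>
    let r1 := collect_loc_combine.foldl (pvPartStep (colon_idx : Int)) ([], [])
    let r2 := collect_sym_combine.foldl (pvPartStep (colon_idx : Int)) (r1.1, [])
    (PySem.List.sorted r2.1 (fun x => x.1) false, r1.2, r2.2)

-- ===== PRECONDITION & SPEC =====
def Spec_collect_colon_item (words : List String) (label_seq : List String) (collect_loc_combine : List (Int × Int)) (collect_sym_combine : List (Int × Int)) (out : (List (Int × Int)) × (List (Int × Int)) × (List (Int × Int))) : Prop := out = collect_colon_item_alt words label_seq collect_loc_combine collect_sym_combine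
instance (words : List String) (label_seq : List String) (collect_loc_combine : List (Int × Int)) (collect_sym_combine : List (Int × Int)) (out : (List (Int × Int)) × (List (Int × Int)) × (List (Int × Int))) : Decidable (Spec_collect_colon_item words label_seq collect_loc_combine collect_sym_combine out) := by unfold Spec_collect_colon_item; infer_instance

-- ===== CLAIM (what is proved, stated in full; the proofs are below) =====
def Claim_equal_collect_colon_item : Prop := ∀ (words : List String) (label_seq : List String) (collect_loc_combine : List (Int × Int)) (collect_sym_combine : List (Int × Int)), Dom_collect_colon_item words label_seq collect_loc_combine collect_sym_combine → Spec_collect_colon_item words label_seq collect_loc_combine collect_sym_combine (collect_colon_item words label_seq collect_loc_combine collect_sym_combine)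

-- ===== LEMMAS AND PROOFS =====

-- B's partition loop = the two order-preserving filters.
theorem pv_partition (c : Int) (l : List (Int × Int)) : ∀ (a b : List (Int × Int)),
    l.foldl (pvPartStep c) (a, b)
      = (a ++ l.filter (fun it => decide (it.2 ≤ c)), b ++ l.filter (fun it => !decide (it.2 ≤ c))) := by
  induction l with
  | nil => intro a b; simp
  | cons x l ih =>
    intro a b
    by_cases hx : x.2 ≤ c <;>
      simp [pvPartStep, hx, ih]

-- Inserting an element smaller than everything puts it at the head.
theorem pv_insertBy_all_before (bef : (Int × Int) → (Int × Int) → Bool) (x : Int × Int)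
    (l : List (Int × Int)) (h : ∀ z ∈ l, bef x z = true) :
    PySem.List.insertBy bef x l = x :: l := by
  cases l with
  | nil => rfl
  | cons y ys => simp [PySem.List.insertBy, h y (List.mem_cons_self)]

-- insertBy into a key-sorted list keeps it key-sorted.
theorem pv_insertBy_pairwise (x : Int × Int) (ys : List (Int × Int))
    (hs : ys.Pairwise (fun a b => a.1 ≤ b.1)) :
    (PySem.List.insertBy (fun a b => decide (a.1 < b.1)) x ys).Pairwise (fun a b => a.1 ≤ b.1) := by
  induction ys with
  | nil => simp [PySem.List.insertBy]
  | cons y ys ih =>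
    rcases List.pairwise_cons.mp hs with ⟨hy, hs'⟩
    by_cases hxy : x.1 < y.1
    · rw [pv_insertBy_all_before _ _ _ (by
        intro z hz
        rcases List.mem_cons.mp hz with rfl | hz
        · simpa using hxy
        · simp only [decide_eq_true_eq]; exact lt_of_lt_of_le hxy (hy z hz))]
      exact List.pairwise_cons.mpr ⟨by
        intro z hz
        rcases List.mem_cons.mp hz with rfl | hz
        · exact le_of_lt hxy
        · exact le_of_lt (lt_of_lt_of_le hxy (hy z hz)), hs⟩
    · simp only [PySem.List.insertBy, decide_eq_true_eq, hxy, if_false]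
      refine List.pairwise_cons.mpr ⟨?_, ih hs'⟩
      intro z hz
      rcases (PySem.List.mem_insertBy _ _ _ _).mp hz with rfl | hz
      · omega
      · exact hy z hz

-- Filtering commutes with a stable insertion into a key-sorted list.
theorem pv_filter_insertBy (p : (Int × Int) → Bool) (x : Int × Int) (ys : List (Int × Int))
    (hs : ys.Pairwise (fun a b => a.1 ≤ b.1)) :
    (PySem.List.insertBy (fun a b => decide (a.1 < b.1)) x ys).filter p
      = if p x then PySem.List.insertBy (fun a b => decide (a.1 < b.1)) x (ys.filter p)
        else ys.filter p := by
  induction ys with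
  | nil => cases hpx : p x <;> simp [PySem.List.insertBy, hpx]
  | cons y ys ih =>
    rcases List.pairwise_cons.mp hs with ⟨hy, hs'⟩
    by_cases hxy : x.1 < y.1
    · have hhead : PySem.List.insertBy (fun a b => decide (a.1 < b.1)) x (y :: ys) = x :: y :: ys := by
        apply pv_insertBy_all_before
        intro z hz
        rcases List.mem_cons.mp hz with rfl | hz
        · simpa using hxy
        · simp only [decide_eq_true_eq]; exact lt_of_lt_of_le hxy (hy z hz)
      rw [hhead]
      cases hpx : p x
      · simp [List.filter_cons, hpx]
      · rw [List.filter_cons, hpx]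
        have hhead2 : PySem.List.insertBy (fun a b => decide (a.1 < b.1)) x ((y :: ys).filter p)
            = x :: (y :: ys).filter p := by
          apply pv_insertBy_all_before
          intro z hz
          have hz' : z ∈ y :: ys := List.mem_of_mem_filter hz
          rcases List.mem_cons.mp hz' with rfl | hz'
          · simpa using hxy
          · simp only [decide_eq_true_eq]; exact lt_of_lt_of_le hxy (hy z hz')
        simp [hhead2]
    · have hstep : PySem.List.insertBy (fun a b => decide (a.1 < b.1)) x (y :: ys)
          = y :: PySem.List.insertBy (fun a b => decide (a.1 < b.1)) x ys := by
        simp [PySem.List.insertBy, hxy]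
      rw [hstep, List.filter_cons, List.filter_cons, ih hs']
      cases hpy : p y
      · simp
      · cases hpx : p x
        · simp
        · have hstep2 : PySem.List.insertBy (fun a b => decide (a.1 < b.1)) x (y :: ys.filter p)
              = y :: PySem.List.insertBy (fun a b => decide (a.1 < b.1)) x (ys.filter p) := by
            simp [PySem.List.insertBy, hxy]
          simp [hstep2]

-- Filtering commutes with B's stable insertion sort.
theorem pv_foldl_insert_filter (p : (Int × Int) → Bool) (l : List (Int × Int)) : ∀ (acc : List (Int × Int)),
    acc.Pairwise (fun a b => a.1 ≤ b.1) →
    (l.foldl (fun acc x => PySem.List.insertBy (fun a b => decide (a.1 < b.1)) x acc) acc).filter p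
      = (l.filter p).foldl (fun acc x => PySem.List.insertBy (fun a b => decide (a.1 < b.1)) x acc) (acc.filter p) := by
  induction l with
  | nil => intro acc _; rfl
  | cons x l ih =>
    intro acc hacc
    rw [List.foldl_cons, ih _ (pv_insertBy_pairwise x acc hacc),
        pv_filter_insertBy p x acc hacc, List.filter_cons]
    cases hpx : p x <;> simp

theorem pv_sorted_filter (p : (Int × Int) → Bool) (xs : List (Int × Int)) :
    (PySem.List.sorted xs (fun x => x.1) false).filter p
      = PySem.List.sorted (xs.filter p) (fun x => x.1) false := by
  rw [PySem.List.sorted_eq_foldl_insertBy, PySem.List.sorted_eq_foldl_insertBy]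
  simpa using pv_foldl_insert_filter p xs [] List.Pairwise.nil

-- The fused scan, characterised by A's vocabulary: first colon position + prefix validity.
theorem pv_scan_spec (ws : List String) : ∀ (ls : List String) (i : Nat),
    pvScan ws ls i =
      match PySem.List.index? ws ":" with
      | none => none
      | some c =>
        if ((ws.take c).zip ls).all (fun p => !(p.2 == "Other" && p.1 != "and"))
        then some (i + c) else none := by
  induction ws with
  | nil => intro ls i; rfl
  | cons w ws ih =>
    intro ls i
    by_cases hw : w = ":"
    · subst hw
      rw [PySem.List.index?_cons_self]
      simp [pvScan]
    · have hw' : (w == ":") = false := by simpa using hw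
      rw [PySem.List.index?_cons_of_ne ws hw]
      cases ls with
      | nil =>
        have hL : pvScan (w :: ws) [] i = pvScan ws [] (i + 1) := by simp [pvScan, hw']
        rw [hL, ih]
        cases hidx : PySem.List.index? ws ":" with
        | none => rfl
        | some c =>
          have he : i + 1 + c = i + (c + 1) := by omega
          simp [List.zip_nil_right, he]
      | cons l ls' =>
        by_cases hbad : (l == "Other" && w != "and") = true
        · have hL : pvScan (w :: ws) (l :: ls') i = none := by simp [pvScan, hw', hbad]
          rw [hL]
          cases hidx : PySem.List.index? ws ":" with
          | none => rfl
          | some c => simp [List.take_succ_cons, hbad]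
        · have hbad' : (l == "Other" && w != "and") = false := by simpa using hbad
          have hL : pvScan (w :: ws) (l :: ls') i = pvScan ws ls' (i + 1) := by
            simp [pvScan, hw', hbad']
          rw [hL, ih]
          cases hidx : PySem.List.index? ws ":" with
          | none => rfl
          | some c =>
            have he : i + 1 + c = i + (c + 1) := by omega
            have hcond : (((List.take (c + 1) (w :: ws)).zip (l :: ls')).all
                (fun p => !(p.2 == "Other" && p.1 != "and")))
                = (((List.take c ws).zip ls').all (fun p => !(p.2 == "Other" && p.1 != "and"))) := by
              simp only [List.take_succ_cons, List.zip_cons_cons, List.all_cons]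
              rw [hbad']
              simp
            simp only [Option.map_some]
            rw [hcond, he]

-- A's prefix check over enumerate(label_seq[:c]) + indexing = B's zip-based check.
theorem pv_prefix_check_eq (words label_seq : List String) (c : Nat) (hc : c < words.length) :
    ((PySem.List.enumerate (PySem.List.slice label_seq none (some (c : Int)))).all
      (fun p => decide (p.2 ≠ "Other") || (PySem.List.pyGet? words p.1 == some "and")))
  = (((words.take c).zip label_seq).all (fun p => !(p.2 == "Other" && p.1 != "and"))) := by
  rw [PySem.List.slice_to_natCast]
  have hlen : (label_seq.take c).length ≤ c := by simp
  have L : ((PySem.List.enumerate (label_seq.take c)).all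
      (fun p => decide (p.2 ≠ "Other") || (PySem.List.pyGet? words p.1 == some "and"))) = true
      ↔ ∀ (k : Nat) (hk : k < (label_seq.take c).length),
          label_seq[k]'(by simp at hk; omega) ≠ "Other" ∨ words[k]'(by omega) = "and" := by
    rw [List.all_eq_true]
    constructor
    · intro h k hk
      have := h ((k : Int), (label_seq.take c)[k])
        (Iff.mpr (PySem.List.mem_enumerate_iff _ _ _) ⟨k, hk, by simp⟩)
      have hkw : k < words.length := by omega
      rw [PySem.List.pyGet?_natCast] at this
      simpa [List.getElem?_eq_getElem hkw] using this
    · intro h p hp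
      rcases Iff.mp (PySem.List.mem_enumerate_iff _ _ _) hp with ⟨k, hk, rfl⟩
      have hkw : k < words.length := by omega
      simp only [zero_add, PySem.List.pyGet?_natCast]
      rcases h k hk with h' | h' <;>
        simp [List.getElem?_eq_getElem hkw, h']
  have R : (((words.take c).zip label_seq).all (fun p => !(p.2 == "Other" && p.1 != "and"))) = true
      ↔ ∀ (k : Nat) (hk : k < (label_seq.take c).length),
          label_seq[k]'(by simp at hk; omega) ≠ "Other" ∨ words[k]'(by omega) = "and" := by
    rw [List.all_eq_true]
    constructor
    · intro h k hk
      have hkz : k < ((words.take c).zip label_seq).length := by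
        simp at hk ⊢; omega
      have := h (((words.take c).zip label_seq)[k]) (List.getElem_mem hkz)
      rw [List.getElem_zip] at this
      simp [List.getElem_take] at this
      exact this
    · intro h p hp
      rcases List.mem_iff_getElem.mp hp with ⟨k, hkz, rfl⟩
      have hk : k < (label_seq.take c).length := by
        simp at hkz ⊢; omega
      rw [List.getElem_zip]
      simp only [List.getElem_take]
      rcases h k hk with h' | h' <;> simp [h']
  cases hR : (((words.take c).zip label_seq).all (fun p => !(p.2 == "Other" && p.1 != "and"))) with
  | true => exact L.mpr (R.mp hR)
  | false =>
    refine Bool.eq_false_iff.mpr (fun hall => ?_)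
    rw [R.mpr (L.mp hall)] at hR
    exact Bool.noConfusion hR
-- In A, membership in the collected list is exactly the numeric test item[1] ≤ colon_idx.
theorem pv_not_mem_collected (loc sym : List (Int × Int)) (c : Int) (xs : List (Int × Int))
    (hsub : ∀ x ∈ xs, x ∈ loc ++ sym) :
    xs.filter (fun item =>
        !(((PySem.List.sorted (loc ++ sym) (fun x => x.1) false).filter
            (fun it => decide (it.2 ≤ c))).contains item))
      = xs.filter (fun it => !decide (it.2 ≤ c)) := by
  apply List.filter_congr
  intro it hit
  have hmem' : it ∈ PySem.List.sorted (loc ++ sym) (fun x => x.1) false :=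
    (PySem.List.mem_sorted _ _ _ _).mpr (hsub it hit)
  by_cases hle : it.2 ≤ c
  · have h1 : it ∈ (PySem.List.sorted (loc ++ sym) (fun x => x.1) false).filter
        (fun it => decide (it.2 ≤ c)) :=
      List.mem_filter.mpr ⟨hmem', by simpa using hle⟩
    have h2 : ((PySem.List.sorted (loc ++ sym) (fun x => x.1) false).filter
        (fun it => decide (it.2 ≤ c))).contains it = true := by simpa using h1
    rw [h2]; simp [hle]
  · have h2 : ((PySem.List.sorted (loc ++ sym) (fun x => x.1) false).filter
        (fun it => decide (it.2 ≤ c))).contains it = false := by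
      simp only [List.contains_eq_mem, decide_eq_false_iff_not]
      exact fun hx => hle (by simpa using (List.mem_filter.mp hx).2)
    rw [h2]; simp [hle]

-- ===== VERDICT (by name: the statement is the Claim_ definition above) =====
theorem collect_colon_item_spec : Claim_equal_collect_colon_item := by
  intro words label_seq loc sym _
  unfold Spec_collect_colon_item collect_colon_item collect_colon_item_alt
  rw [pv_scan_spec words label_seq 0]
  cases h : PySem.List.index? words ":" with
  | none =>
    have hnm : ":" ∉ words := (PySem.List.index?_eq_none_iff words ":").mp h
    simp [hnm]
  | some c =>
    have hmem : ":" ∈ words :=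
      (PySem.List.index?_isSome_iff words ":").mp
        (show (PySem.List.index? words ":").isSome = true by rw [h]; rfl)
    obtain ⟨hc, -, -⟩ := PySem.List.getElem_of_index?_eq_some h
    have hcont : words.contains ":" = true := by simpa using hmem
    simp only [hcont, if_true]
    rw [pv_prefix_check_eq words label_seq c hc]
    cases hck : (((words.take c).zip label_seq).all (fun p => !(p.2 == "Other" && p.1 != "and"))) with
    | false => rfl
    | true =>
      rw [if_pos rfl, if_pos rfl]
      simp only [Nat.zero_add]
      rw [PySem.List.foldl_append_ite_eq_filter (fun it : Int × Int => it.2 ≤ (c : Int))]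
      simp only [pv_partition, List.nil_append]
      rw [pv_not_mem_collected loc sym (c : Int) loc (fun x hx => List.mem_append_left _ hx),
          pv_not_mem_collected loc sym (c : Int) sym (fun x hx => List.mem_append_right _ hx)]
      rw [← List.filter_append, ← pv_sorted_filter]
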